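-- pv_equiv track=rewrite | github.com/TGlinsek/Pesmarica | transponiraj.py | razdeli_vrstico
-- ===== SOURCE A (Python) =====
-- def razdeli_vrstico(niz):
--     akordi = []
--     akord = ""
--     for h, i in enumerate(niz):
--         if i != " " and i != "\t":  # tt tab je sam za zlo redke edge case, ampak lj, zaka pa ne
--             if len(akord) >= 3:
--                 j = i.lower()
--                 if i.isdigit() or j in "ijklmnopqrsštuvwxyzž" or (j == "a" and akord[-1] == "m"):
--                     pass
--                 else:
--                     akordi.append((akord, h - len(akord)))  # drugi člen je samo indeks, kjer se je niz začel
--                     akord = ""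
--             """
--             elif len(akord) == 1:  # tu ni >= 1, ker drugače bi se "cmaj7" spremenil v "cm" in "aj7"
--                 j = i.lower()
--                 if j in "abcdefgh":
--                     akordi.append(akord)
--                     akord = ""
--             """  # to je zato, da recimo loči niz "Cfis" v "c" in "fis"
--             akord += i
--         else:
--             if akord != "":
--                 akordi.append((akord, h - len(akord)))
--                 akord = ""
--     akordi += [(akord, len(niz) - len(akord))] * (len(akord) > 0)
--     return akordi
-- ===== SOURCE B (Python) =====
-- def _runs(niz):
--     # pass 1: spans (start, end) of maximal runs of non-separator characters
--     spans = []
--     start = None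
--     for h, ch in enumerate(niz):
--         if ch == " " or ch == "\t":
--             if start is not None:
--                 spans.append((start, h))
--                 start = None
--         elif start is None:
--             start = h
--     if start is not None:
--         spans.append((start, len(niz)))
--     return [(niz[a:b], a) for a, b in spans]
--
--
-- def _split_run(run, base):
--     # pass 2: split one separator-free run into chords by start indices
--     out = []
--     tok = 0
--     for k, ch in enumerate(run):
--         if k - tok >= 3:
--             j = ch.lower()
--             if not (ch.isdigit() or j in "ijklmnopqrsštuvwxyzž" or (j == "a" and run[k - 1] == "m")):
--                 out.append((run[tok:k], base + tok))
--                 tok = k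
--     out.append((run[tok:], base + tok))
--     return out
--
--
-- def razdeli_vrstico(niz):
--     res = []
--     for run, base in _runs(niz):
--         res += _split_run(run, base)
--     return res
-- ===== Notes on version B (the rewrite author's own statement) =====
-- stated objective: alternative
-- what changed: A interleaves run detection and chord splitting in one accumulator scan that builds each token character by character; B first collects the (start, end) spans of maximal separator-free runs, then splits each run by token-start indices, emitting tokens as slices of the run.
import Mathlib
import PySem

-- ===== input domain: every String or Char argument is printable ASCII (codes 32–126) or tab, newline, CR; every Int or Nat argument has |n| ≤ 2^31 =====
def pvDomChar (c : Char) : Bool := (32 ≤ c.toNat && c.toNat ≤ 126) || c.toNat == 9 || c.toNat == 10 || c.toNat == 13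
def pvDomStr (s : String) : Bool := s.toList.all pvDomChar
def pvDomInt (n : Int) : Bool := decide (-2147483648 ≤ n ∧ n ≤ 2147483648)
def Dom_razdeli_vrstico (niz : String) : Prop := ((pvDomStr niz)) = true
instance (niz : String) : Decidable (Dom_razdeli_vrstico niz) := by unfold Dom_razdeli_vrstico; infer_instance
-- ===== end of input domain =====

-- B re-implements the single-pass accumulator scan as two passes — collect the (start, end) spans of
-- maximal separator-free runs, then split each run by token-start indices and slicing (alternative
-- decomposition, same cost); return values are proved equal on every input.

-- ===== PORT A =====
-- the "continuation" test shared by both Pythons: `i.isdigit() or i.lower() in "…" or (i.lower() == "a" and <prev char> == "m")`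
def pvCont (i : Char) (prev : Option Char) : Bool :=
  PySem.Chars.isdigit i || PySem.Chars.isIn [PySem.Chars.lowerChar i] ("ijklmnopqrsštuvwxyzž".toList)
    || (PySem.Chars.lowerChar i == 'a' && prev == some 'm')

-- one iteration of A's `for h, i in enumerate(niz)` loop; state = (akordi, akord) (strings as List Char)
def pvStepA (st : List (List Char × Int) × List Char) (hc : Int × Char) :
    List (List Char × Int) × List Char :=
  if hc.2 ≠ ' ' ∧ hc.2 ≠ '\t' then
    if 3 ≤ st.2.length then
      if pvCont hc.2 (PySem.List.pyGet? st.2 (-1)) then (st.1, st.2 ++ [hc.2])   -- pass; akord += i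
      else (st.1 ++ [(st.2, hc.1 - st.2.length)], [hc.2])
    else (st.1, st.2 ++ [hc.2])
  else
    if st.2 ≠ [] then (st.1 ++ [(st.2, hc.1 - st.2.length)], []) else st

def razdeli_vrstico (niz : String) : List (String × Int) :=
  let cs := niz.toList
  let fin := (PySem.List.enumerate cs).foldl pvStepA ([], [])
  let akordi := fin.1 ++ (if 0 < fin.2.length then [(fin.2, (cs.length : Int) - fin.2.length)] else [])
  akordi.map (fun p => (String.ofList p.1, p.2))

-- ===== PORT B =====
-- pass 1 step: collect (start, end) spans of maximal non-separator runs; state = (spans, start)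
def pvRunStep (st : List (Int × Int) × Option Int) (hc : Int × Char) :
    List (Int × Int) × Option Int :=
  if hc.2 = ' ' ∨ hc.2 = '\t' then
    match st.2 with
    | some a => (st.1 ++ [(a, hc.1)], none)
    | none => st
  else
    match st.2 with
    | none => (st.1, some hc.1)
    | some _ => st

def pvRuns (cs : List Char) : List (List Char × Int) :=
  let st := (PySem.List.enumerate cs).foldl pvRunStep ([], none)
  let spans := st.1 ++ (match st.2 with | some a => [(a, (cs.length : Int))] | none => [])
  spans.map (fun ab => (PySem.List.slice cs (some ab.1) (some ab.2), ab.1))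

-- pass 2 step: one iteration of `for k, ch in enumerate(run)`; state = (out, tok_start)
def pvSplitStep (run : List Char) (base : Int) (st : List (List Char × Int) × Int)
    (kc : Int × Char) : List (List Char × Int) × Int :=
  if 3 ≤ kc.1 - st.2 then
    if pvCont kc.2 (PySem.List.pyGet? run (kc.1 - 1)) then st
    else (st.1 ++ [(PySem.List.slice run (some st.2) (some kc.1), base + st.2)], kc.1)
  else st

def pvSplitRun (run : List Char) (base : Int) : List (List Char × Int) :=
  let st := (PySem.List.enumerate run).foldl (pvSplitStep run base) ([], 0)
  st.1 ++ [(PySem.List.slice run (some st.2) none, base + st.2)]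

def razdeli_vrstico_alt (niz : String) : List (String × Int) :=
  let res := (pvRuns niz.toList).foldl (fun acc rb => acc ++ pvSplitRun rb.1 rb.2) []
  res.map (fun p => (String.ofList p.1, p.2))

-- ===== PRECONDITION & SPEC =====
def Spec_razdeli_vrstico (niz : String) (out : List (String × Int)) : Prop := out = razdeli_vrstico_alt niz
instance (niz : String) (out : List (String × Int)) : Decidable (Spec_razdeli_vrstico niz out) := by unfold Spec_razdeli_vrstico; infer_instance

-- ===== CLAIM (what is proved, stated in full; the proofs are below) =====
def Claim_equal_razdeli_vrstico : Prop := ∀ (niz : String), Dom_razdeli_vrstico niz → Spec_razdeli_vrstico niz (razdeli_vrstico niz)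

-- ===== LEMMAS AND PROOFS =====

-- the final states of the two scans and of B's inner (per-run) loop
def pvFA (cs : List Char) : List (List Char × Int) × List Char :=
  (PySem.List.enumerate cs).foldl pvStepA ([], [])
def pvFR (cs : List Char) : List (Int × Int) × Option Int :=
  (PySem.List.enumerate cs).foldl pvRunStep ([], none)
def pvG (run : List Char) (base : Int) : List (List Char × Int) × Int :=
  (PySem.List.enumerate run).foldl (pvSplitStep run base) ([], 0)

-- tokens B emits for the span list `spans` read against the base string `cs`
def pvFlat (cs : List Char) (spans : List (Int × Int)) : List (List Char × Int) :=
  spans.flatMap (fun ab => pvSplitRun (PySem.List.slice cs (some ab.1) (some ab.2)) ab.1)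

theorem pvEnumSnoc (xs : List Char) (c : Char) (s : Int) :
    PySem.List.enumerate (xs ++ [c]) s = PySem.List.enumerate xs s ++ [(s + xs.length, c)] := by
  induction xs generalizing s with
  | nil => simp [PySem.List.enumerate]
  | cons x xs ih =>
    simp only [List.cons_append, PySem.List.enumerate, ih, List.length_cons, List.cons.injEq,
      List.append_cancel_left_eq, List.cons.injEq, Prod.mk.injEq, and_true, true_and]
    push_cast
    ring

theorem pvMemEnum (xs : List Char) (s : Int) (p : Int × Char) (h : p ∈ PySem.List.enumerate xs s) :
    s ≤ p.1 ∧ p.1 < s + xs.length := by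
  induction xs generalizing s with
  | nil => simp [PySem.List.enumerate] at h
  | cons x xs ih =>
    simp [PySem.List.enumerate] at h
    rcases h with h | h
    · subst h; simp
    · have := ih (s + 1) h; push_cast [List.length_cons]; omega

theorem pvGetAppend (xs ys : List Char) (i : Int) (h0 : 0 ≤ i) (h1 : i < xs.length) :
    PySem.List.pyGet? (xs ++ ys) i = PySem.List.pyGet? xs i := by
  have : i = ((i.toNat : Nat) : Int) := by omega
  rw [this, PySem.List.pyGet?_natCast, PySem.List.pyGet?_natCast]
  rw [List.getElem?_append_left (by omega)]

theorem pvGetNegOne (xs : List Char) (h : xs ≠ []) :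
    PySem.List.pyGet? xs (-1) = xs.getLast? := by
  have hl : 0 < xs.length := List.length_pos_iff.mpr h
  simp only [PySem.List.pyGet?, PySem.List.pyIdx?]
  rw [if_neg (by omega), if_pos (by omega)]
  simp only [Option.bind_some]
  rw [List.getLast?_eq_getElem?]
  congr 1

theorem pvSliceEq (xs : List Char) (a b : Int) (h0 : 0 ≤ a) (hab : a ≤ b) (h2 : b ≤ xs.length) :
    PySem.List.slice xs (some a) (some b) = (xs.drop a.toNat).take (b.toNat - a.toNat) := by
  simp only [PySem.List.slice, PySem.List.clampIdx]
  rw [if_neg (by omega), if_neg (by omega)]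
  rw [Nat.min_eq_left (by omega), Nat.min_eq_left (by omega)]

theorem pvSliceAppend (xs ys : List Char) (a b : Int) (h0 : 0 ≤ a) (hab : a ≤ b) (h2 : b ≤ xs.length) :
    PySem.List.slice (xs ++ ys) (some a) (some b) = PySem.List.slice xs (some a) (some b) := by
  rw [pvSliceEq _ _ _ h0 hab (by simp; omega), pvSliceEq _ _ _ h0 hab h2]
  rw [List.drop_append_of_le_length (by omega)]
  rw [List.take_append_of_le_length (by simp; omega)]

theorem pvFlatStable (cs : List Char) (c : Char) (spans : List (Int × Int))
    (h : ∀ p ∈ spans, 0 ≤ p.1 ∧ p.1 ≤ p.2 ∧ p.2 ≤ (cs.length : Int)) :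
    pvFlat (cs ++ [c]) spans = pvFlat cs spans := by
  unfold pvFlat
  induction spans with
  | nil => rfl
  | cons p ps ih =>
    simp only [List.flatMap_cons]
    rw [pvSliceAppend _ _ _ _ (h p (by simp)).1 (h p (by simp)).2.1 (h p (by simp)).2.2]
    rw [ih (fun q hq => h q (by simp [hq]))]

theorem pvGExt (r extra : List Char) (b : Int) (l : List (Int × Char))
    (hl : ∀ p ∈ l, 0 ≤ p.1 ∧ p.1 < (r.length : Int)) :
    ∀ (st : List (List Char × Int) × Int), 0 ≤ st.2 →
    l.foldl (pvSplitStep (r ++ extra) b) st = l.foldl (pvSplitStep r b) st := by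
  induction l with
  | nil => intro st _; rfl
  | cons p ps ih =>
    intro st hst
    have hp := hl p (by simp)
    simp only [List.foldl_cons]
    have hstep : pvSplitStep (r ++ extra) b st p = pvSplitStep r b st p := by
      unfold pvSplitStep
      by_cases h3 : 3 ≤ p.1 - st.2
      · simp only [if_pos h3]
        rw [pvGetAppend _ _ _ (by omega) (by omega)]
        rw [pvSliceAppend _ _ _ _ hst (by omega) (by omega)]
      · simp only [if_neg h3]
    rw [hstep]
    obtain ⟨hp1, hp2⟩ := hp
    have hpos : 0 ≤ (pvSplitStep r b st p).2 := by
      unfold pvSplitStep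
      split_ifs <;> first | exact hst | (simp only; omega)
    exact ih (fun q hq => hl q (by simp [hq])) _ hpos

-- the joint loop invariant relating A's one-pass state to B's two-pass data
def pvInv (cs : List Char) : Prop :=
  (∀ p ∈ (pvFR cs).1, 0 ≤ p.1 ∧ p.1 ≤ p.2 ∧ p.2 ≤ (cs.length : Int)) ∧
  ((pvFR cs).2 = none → (pvFA cs).2 = [] ∧ (pvFA cs).1 = pvFlat cs (pvFR cs).1) ∧
  (∀ s : Int, (pvFR cs).2 = some s → 0 ≤ s ∧ s ≤ (cs.length : Int) ∧ (pvFA cs).2 ≠ [] ∧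
    0 ≤ (pvG (cs.drop s.toNat) s).2 ∧
    (pvG (cs.drop s.toNat) s).2 + ((pvFA cs).2.length : Int) = ((cs.drop s.toNat).length : Int) ∧
    (pvFA cs).2 = (cs.drop s.toNat).drop (pvG (cs.drop s.toNat) s).2.toNat ∧
    (pvFA cs).1 = pvFlat cs (pvFR cs).1 ++ (pvG (cs.drop s.toNat) s).1)


-- a run is its own slice once the span closes
theorem pvRunSliceEq (xs : List Char) (s : Int) (h0 : 0 ≤ s) (h1 : s ≤ (xs.length : Int)) :
    PySem.List.slice xs (some s) (some (xs.length : Int)) = xs.drop s.toNat := by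
  rw [pvSliceEq _ _ _ h0 h1 (le_refl _)]
  exact List.take_of_length_le (by simp)

-- B's pass-2 result, written through the inner-loop state pvG
theorem pvSplitRunEq (run : List Char) (base : Int) :
    pvSplitRun run base =
      (pvG run base).1 ++ [(PySem.List.slice run (some (pvG run base).2) none, base + (pvG run base).2)] := rfl

theorem pvInvHolds (cs : List Char) : pvInv cs := by
  induction cs using List.reverseRecOn with
  | nil =>
    refine ⟨?_, ?_, ?_⟩ <;> simp [pvFA, pvFR, pvFlat, PySem.List.enumerate]
  | append_singleton xs c ih =>
    obtain ⟨ihB, ihN, ihS⟩ := ih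
    have hFA : pvFA (xs ++ [c]) = pvStepA (pvFA xs) ((xs.length : Int), c) := by
      unfold pvFA
      rw [pvEnumSnoc, List.foldl_append]
      simp
    have hFR : pvFR (xs ++ [c]) = pvRunStep (pvFR xs) ((xs.length : Int), c) := by
      unfold pvFR
      rw [pvEnumSnoc, List.foldl_append]
      simp
    by_cases hsep : c = ' ' ∨ c = '\t'
    · -- separator character
      have hcA : ¬ (c ≠ ' ' ∧ c ≠ '\t') := by tauto
      cases hopt : (pvFR xs).2 with
      | none =>
        obtain ⟨htok, hacc⟩ := ihN hopt
        have hFR' : pvFR (xs ++ [c]) = pvFR xs := by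
          rw [hFR]; unfold pvRunStep; rw [if_pos hsep, hopt]
        have hFA' : pvFA (xs ++ [c]) = pvFA xs := by
          rw [hFA]; unfold pvStepA; rw [if_neg hcA, if_neg (by simp [htok])]
        refine ⟨?_, ?_, ?_⟩
        · rw [hFR']; intro p hp; have := ihB p hp; simp only [List.length_append, List.length_singleton]; push_cast; omega
        · intro _; rw [hFA', hFR']
          exact ⟨htok, hacc.trans (pvFlatStable xs c _ ihB).symm⟩
        · intro s hs; rw [hFR', hopt] at hs; exact absurd hs (by simp)
      | some s =>
        obtain ⟨hs0, hsle, htokne, hts0, htslen, htok, hacc⟩ := ihS s hopt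
        have hrlen : ((xs.drop s.toNat).length : Int) = (xs.length : Int) - s := by
          rw [List.length_drop]; omega
        have hFR' : pvFR (xs ++ [c]) = ((pvFR xs).1 ++ [(s, (xs.length : Int))], none) := by
          rw [hFR]; unfold pvRunStep; rw [if_pos hsep, hopt]
        have hFA' : pvFA (xs ++ [c]) =
            ((pvFA xs).1 ++ [((pvFA xs).2, (xs.length : Int) - (pvFA xs).2.length)], []) := by
          rw [hFA]; unfold pvStepA; rw [if_neg hcA, if_pos htokne]
        refine ⟨?_, ?_, ?_⟩
        · rw [hFR']; intro p hp
          simp only [List.mem_append, List.mem_singleton] at hp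
          rcases hp with hp | hp
          · have := ihB p hp; simp only [List.length_append, List.length_singleton]; push_cast; omega
          · subst hp; simp only [List.length_append, List.length_singleton]; push_cast; omega
        · intro _
          rw [hFA', hFR']
          refine ⟨rfl, ?_⟩
          simp only
          unfold pvFlat
          rw [List.flatMap_append, List.flatMap_singleton]
          rw [← pvFlat, pvFlatStable xs c _ ihB]
          rw [pvSliceAppend _ _ _ _ hs0 hsle (le_refl _), pvRunSliceEq _ _ hs0 hsle]
          rw [pvSplitRunEq, PySem.List.slice_from _ hts0, ← htok, hacc]
          have hidx : (xs.length : Int) - (pvFA xs).2.length = s + (pvG (xs.drop s.toNat) s).2 := by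
            have hlt : ((pvFA xs).2.length : Int) = ((xs.drop s.toNat).length : Int) - (pvG (xs.drop s.toNat) s).2 := by omega
            omega
          rw [hidx, List.append_assoc]
        · intro s' hs'; rw [hFR'] at hs'; exact absurd hs' (by simp)
    · -- non-separator character
      have hcA : c ≠ ' ' ∧ c ≠ '\t' := by
        constructor <;> intro h <;> exact hsep (by simp [h])
      cases hopt : (pvFR xs).2 with
      | none =>
        obtain ⟨htok, hacc⟩ := ihN hopt
        have hFR' : pvFR (xs ++ [c]) = ((pvFR xs).1, some (xs.length : Int)) := by
          rw [hFR]; unfold pvRunStep; rw [if_neg hsep, hopt]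
        have hFA' : pvFA (xs ++ [c]) = ((pvFA xs).1, [c]) := by
          rw [hFA]; unfold pvStepA
          rw [if_pos hcA, if_neg (by rw [htok]; simp), htok]
          rfl
        refine ⟨?_, ?_, ?_⟩
        · rw [hFR']; intro p hp; have := ihB p hp
          simp only [List.length_append, List.length_singleton]; push_cast; omega
        · intro hnone; rw [hFR'] at hnone; exact absurd hnone (by simp)
        · intro s' hs'
          rw [hFR'] at hs'
          simp only [Option.some.injEq] at hs'
          subst hs'
          have hdrop : (xs ++ [c]).drop ((xs.length : Int)).toNat = [c] := by
            simp
          have hg : pvG [c] (xs.length : Int) = ([], 0) := by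
            have h1 : PySem.List.enumerate [c] 0 = [((0 : Int), c)] := by
              simp [PySem.List.enumerate]
            unfold pvG
            rw [h1]
            simp only [List.foldl_cons, List.foldl_nil]
            unfold pvSplitStep
            rw [if_neg (by norm_num)]
          rw [hFA', hFR', hdrop, hg]
          refine ⟨by positivity, by simp only [List.length_append, List.length_singleton]; push_cast; omega,
            by simp, le_refl _, by simp, by simp, ?_⟩
          simp only [List.append_nil]
          exact hacc.trans (pvFlatStable xs c _ ihB).symm
      | some s =>
        obtain ⟨hs0, hsle, htokne, hts0, htslen, htok, hacc⟩ := ihS s hopt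
        have hFR' : pvFR (xs ++ [c]) = pvFR xs := by
          rw [hFR]; unfold pvRunStep; rw [if_neg hsep, hopt]
        have hr' : (xs ++ [c]).drop s.toNat = xs.drop s.toNat ++ [c] :=
          List.drop_append_of_le_length (by omega)
        have hrlen : ((xs.drop s.toNat).length : Int) = (xs.length : Int) - s := by
          rw [List.length_drop]; omega
        have hG' : pvG (xs.drop s.toNat ++ [c]) s =
            pvSplitStep (xs.drop s.toNat ++ [c]) s (pvG (xs.drop s.toNat) s)
              (((xs.drop s.toNat).length : Int), c) := by
          unfold pvG
          rw [pvEnumSnoc, List.foldl_append]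
          rw [pvGExt (xs.drop s.toNat) [c] s (PySem.List.enumerate (xs.drop s.toNat) 0)
            (fun p hp => by have := pvMemEnum _ 0 p hp; constructor <;> omega) ([], 0) (le_refl 0)]
          simp
        have hklen : ((xs.drop s.toNat).length : Int) - (pvG (xs.drop s.toNat) s).2 =
            ((pvFA xs).2.length : Int) := by omega
        -- obligations shared by every state-preserving branch
        have keep : pvFA (xs ++ [c]) = ((pvFA xs).1, (pvFA xs).2 ++ [c]) →
            pvG (xs.drop s.toNat ++ [c]) s = pvG (xs.drop s.toNat) s → pvInv (xs ++ [c]) := by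
          intro hFA' hg'
          refine ⟨?_, ?_, ?_⟩
          · rw [hFR']; intro p hp; have := ihB p hp
            simp only [List.length_append, List.length_singleton]; push_cast; omega
          · intro hnone; rw [hFR', hopt] at hnone; exact absurd hnone (by simp)
          · intro s' hs'
            rw [hFR', hopt] at hs'
            simp only [Option.some.injEq] at hs'
            subst hs'
            rw [hFA', hr', hg']
            refine ⟨hs0, by simp only [List.length_append, List.length_singleton]; push_cast; omega,
              by simp, hts0, ?_, ?_, ?_⟩
            · simp only [List.length_append, List.length_singleton]; push_cast; omega
            · rw [List.drop_append_of_le_length (by omega), ← htok]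
            · rw [hFR', pvFlatStable xs c _ ihB]; exact hacc
        by_cases h3 : 3 ≤ (pvFA xs).2.length
        · have h3' : 3 ≤ ((xs.drop s.toNat).length : Int) - (pvG (xs.drop s.toNat) s).2 := by
            push_cast at hklen ⊢; omega
          have hprev : PySem.List.pyGet? (xs.drop s.toNat ++ [c]) (((xs.drop s.toNat).length : Int) - 1) =
              PySem.List.pyGet? (pvFA xs).2 (-1) := by
            rw [pvGetAppend _ _ _ (by omega) (by omega)]
            rw [pvGetNegOne _ htokne, htok]
            rw [List.getLast?_drop, if_neg (by omega)]
            rw [show ((xs.drop s.toNat).length : Int) - 1 = (((xs.drop s.toNat).length - 1 : Nat) : Int) by omega]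
            rw [PySem.List.pyGet?_natCast, List.getLast?_eq_getElem?]
          cases hcont : pvCont c (PySem.List.pyGet? (pvFA xs).2 (-1)) with
          | true =>
            refine keep ?_ ?_
            · rw [hFA]; unfold pvStepA
              rw [if_pos hcA, if_pos h3]
              simp [hcont]
            · rw [hG']; unfold pvSplitStep
              rw [if_pos h3', hprev]
              simp [hcont]
          | false =>
            have hFA' : pvFA (xs ++ [c]) =
                ((pvFA xs).1 ++ [((pvFA xs).2, (xs.length : Int) - (pvFA xs).2.length)], [c]) := by
              rw [hFA]; unfold pvStepA
              rw [if_pos hcA, if_pos h3]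
              simp [hcont]
            have hg' : pvG (xs.drop s.toNat ++ [c]) s =
                ((pvG (xs.drop s.toNat) s).1 ++
                  [((pvFA xs).2, s + (pvG (xs.drop s.toNat) s).2)],
                 ((xs.drop s.toNat).length : Int)) := by
              rw [hG']; unfold pvSplitStep
              rw [if_pos h3', hprev]
              simp only [hcont, Bool.false_eq_true, if_false]
              rw [pvSliceAppend _ _ _ _ hts0 (by omega) (le_refl _)]
              rw [pvSliceEq _ _ _ hts0 (by omega) (le_refl _)]
              simp only [Int.toNat_natCast]
              rw [← htok, List.take_of_length_le (by omega)]
            refine ⟨?_, ?_, ?_⟩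
            · rw [hFR']; intro p hp; have := ihB p hp
              simp only [List.length_append, List.length_singleton]; push_cast; omega
            · intro hnone; rw [hFR', hopt] at hnone; exact absurd hnone (by simp)
            · intro s' hs'
              rw [hFR', hopt] at hs'
              simp only [Option.some.injEq] at hs'
              subst hs'
              rw [hFA', hr', hg']
              refine ⟨hs0, by simp only [List.length_append, List.length_singleton]; push_cast; omega,
                by simp, by positivity, ?_, ?_, ?_⟩
              · simp only [List.length_append, List.length_singleton]; push_cast; omega
              · simp
              · have hidx : (xs.length : Int) - ((pvFA xs).2.length : Int) =
                    s + (pvG (xs.drop s.toNat) s).2 := by omega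
                rw [hFR', hacc, pvFlatStable xs c _ ihB, List.append_assoc, hidx]
        · refine keep ?_ ?_
          · rw [hFA]; unfold pvStepA
            rw [if_pos hcA, if_neg h3]
          · rw [hG']; unfold pvSplitStep
            rw [if_neg (by omega)]



theorem pvMain (cs : List Char) :
    (pvFA cs).1 ++ (if 0 < (pvFA cs).2.length then [((pvFA cs).2, (cs.length : Int) - (pvFA cs).2.length)] else []) =
      (pvRuns cs).foldl (fun acc rb => acc ++ pvSplitRun rb.1 rb.2) [] := by
  obtain ⟨hB, hN, hS⟩ := pvInvHolds cs
  have hruns : pvRuns cs =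
      ((pvFR cs).1 ++ (match (pvFR cs).2 with
        | some a => [(a, (cs.length : Int))] | none => [])).map
        (fun ab => (PySem.List.slice cs (some ab.1) (some ab.2), ab.1)) := rfl
  cases hopt : (pvFR cs).2 with
  | none =>
    obtain ⟨htok, hacc⟩ := hN hopt
    rw [hopt] at hruns
    simp only [List.append_nil] at hruns
    rw [PySem.List.foldl_append_eq_flatMap, hruns, List.flatMap_map, List.nil_append, htok]
    simp only [List.length_nil, lt_irrefl, if_false, List.append_nil]
    exact hacc
  | some s =>
    obtain ⟨hs0, hsle, htokne, hts0, htslen, htok, hacc⟩ := hS s hopt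
    have hrlen : ((cs.drop s.toNat).length : Int) = (cs.length : Int) - s := by
      rw [List.length_drop]; omega
    rw [hopt] at hruns
    rw [PySem.List.foldl_append_eq_flatMap, hruns, List.flatMap_map, List.nil_append]
    simp only [List.flatMap_append, List.flatMap_singleton]
    rw [pvRunSliceEq _ _ hs0 hsle, pvSplitRunEq, PySem.List.slice_from _ hts0, ← htok]
    rw [if_pos (List.length_pos_iff.mpr htokne)]
    have hidx : (cs.length : Int) - ((pvFA cs).2.length : Int) =
        s + (pvG (cs.drop s.toNat) s).2 := by omega
    rw [hacc, hidx, List.append_assoc]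
    rfl

-- ===== VERDICT (by name: the statement is the Claim_ definition above) =====
theorem razdeli_vrstico_spec : Claim_equal_razdeli_vrstico := by
  intro niz _
  unfold Spec_razdeli_vrstico razdeli_vrstico razdeli_vrstico_alt
  simp only
  rw [show (PySem.List.enumerate niz.toList).foldl pvStepA ([], []) = pvFA niz.toList from rfl]
  rw [← pvMain niz.toList]
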